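-- pv_equiv track=rewrite | github.com/horiy0125/atcoder-beginner-contests | 192/C copy.py | f
-- ===== SOURCE A (Python) =====
-- def f(number, K, now):
--
--     g2 = int(''.join(sorted(str(number))))
--     g1 = int(''.join(sorted(str(number), reverse=True)))
--
--     now += 1
--     answer = int(g1) - int(g2)
--     if now == K:
--         return answer
--     else:
--         return f(answer, K, now)
-- ===== SOURCE B (Python) =====
-- def _step(n):
--     g2 = int(''.join(sorted(str(n))))
--     g1 = int(''.join(sorted(str(n), reverse=True)))
--     return g1 - g2
--
--
-- def f(number, K, now):
--     seen = {}
--     v = number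
--     while now != K:
--         if v in seen:
--             cycle = now - seen[v]
--             skip = (K - now) // cycle
--             if skip > 0:
--                 now += skip * cycle
--                 continue
--         seen[v] = now
--         v = _step(v)
--         now += 1
--     return v
-- ===== Notes on version B (the rewrite author's own statement) =====
-- stated objective: faster
-- what changed: B replaces A's K-now recursive applications of the digit-sort difference transform by a single loop with a visited-state dictionary that, once a repeated state is seen, jumps the step counter forward by whole cycles, so only the pre-period plus one cycle of transform applications is ever computed.
import Mathlib
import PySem

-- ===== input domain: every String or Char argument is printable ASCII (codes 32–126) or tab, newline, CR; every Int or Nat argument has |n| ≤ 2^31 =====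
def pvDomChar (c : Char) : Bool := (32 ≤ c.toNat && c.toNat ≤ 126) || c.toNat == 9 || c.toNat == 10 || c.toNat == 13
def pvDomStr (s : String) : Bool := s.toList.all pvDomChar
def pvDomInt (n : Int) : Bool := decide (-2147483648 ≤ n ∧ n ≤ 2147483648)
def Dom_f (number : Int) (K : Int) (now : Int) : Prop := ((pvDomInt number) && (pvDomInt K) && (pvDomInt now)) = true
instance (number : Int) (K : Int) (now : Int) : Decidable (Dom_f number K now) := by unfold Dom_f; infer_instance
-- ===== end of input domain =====

-- B replaces A's K-now recursive transform applications by one loop with a visited-state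
-- dictionary that jumps the step counter forward by whole cycles, so it applies the transform
-- at most pre-period-plus-one-cycle times instead of K - now times (objective: faster).

-- ===== PORT A =====
-- The digit-sort difference step shared by both programs (A inlines it; Source B names it _step).
-- int(...) is PySem.Int.ofChars?; '.getD 0' is unreachable under Pre_f (number ≥ 0 keeps every
-- iterate ≥ 0, so the sorted digit string always parses; Python raises ValueError on negatives,
-- excluded by Pre_f).
def dstep (number : Int) : Int :=
  let g2 := (PySem.Int.ofChars? (PySem.List.sorted (PySem.Int.toStr number).toList (fun c => c) false)).getD 0
  let g1 := (PySem.Int.ofChars? (PySem.List.sorted (PySem.Int.toStr number).toList (fun c => c) true)).getD 0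
  g1 - g2

-- A's recursion; fuel = (K - now).toNat is a pure totality guard (Python recurses forever when
-- now ≥ K; Pre_f excludes that).
def fA : Nat → Int → Int → Int → Int
  | 0, _, _, _ => 0
  | fuel+1, number, K, now =>
    let answer := dstep number
    let now := now + 1
    if now = K then answer else fA fuel answer K now

def f (number : Int) (K : Int) (now : Int) : Int := fA (K - now).toNat number K now

-- ===== PORT B =====
-- port of Source B's 'while now != K' loop; fuel = (K - now).toNat + 1 is a pure totality guard:
-- inside Pre_f 'now' grows by at least 1 per iteration (a jump moves it by ≥ cycle ≥ 1 and
-- never past K), so the loop exits before the fuel runs out and the fuel-0 value is unreached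
-- (Python loops forever when now > K; Pre_f excludes that)
def loopB (K : Int) : PySem.Dict Int Int → Int → Int → Nat → Int
  | _, v, _, 0 => v
  | seen, v, now, fuel+1 =>
    if now = K then v
    else
      match PySem.Dict.get? seen v with
      | some prev =>
        let cycle := now - prev
        let skip := PySem.Int.floordiv (K - now) cycle
        if 0 < skip then
          loopB K seen v (now + skip * cycle) fuel
        else
          loopB K (seen.insert v now) (dstep v) (now + 1) fuel
      | none => loopB K (seen.insert v now) (dstep v) (now + 1) fuel

def f_alt (number : Int) (K : Int) (now : Int) : Int :=
  loopB K PySem.Dict.empty number now ((K - now).toNat + 1)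

-- ===== PRECONDITION & SPEC =====
-- Pre_f is exactly where Python A returns: number ≥ 0 (a negative number's digit string '…-'
-- raises ValueError in int()) and now < K (otherwise the recursion never hits 'now == K' and
-- raises RecursionError).
def Pre_f (number : Int) (K : Int) (now : Int) : Prop := 0 ≤ number ∧ now < K
instance (number : Int) (K : Int) (now : Int) : Decidable (Pre_f number K now) := by unfold Pre_f; infer_instance
def pvWitness_f : Int × Int × Int := (829, 3, 0)

def Spec_f (number : Int) (K : Int) (now : Int) (out : Int) : Prop := out = f_alt number K now
instance (number : Int) (K : Int) (now : Int) (out : Int) : Decidable (Spec_f number K now out) := by unfold Spec_f; infer_instance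

-- ===== CLAIM (what is proved, stated in full; the proofs are below) =====
def Claim_equal_f : Prop := ∀ (number : Int) (K : Int) (now : Int), Dom_f number K now → Pre_f number K now → Spec_f number K now (f number K now)

-- ===== LEMMAS AND PROOFS =====

-- iterate a step function t times (the reference the two loop shapes are compared against;
-- generic in g so the proofs never unfold dstep)
def iterG (g : Int → Int) (w : Int) : Nat → Int
  | 0 => w
  | t+1 => iterG g (g w) t

lemma iterG_succ_right (g : Int → Int) (w : Int) (t : Nat) :
    iterG g w (t + 1) = g (iterG g w t) := by
  induction t generalizing w with
  | zero => simp only [iterG]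
  | succ t ih => exact ih (g w)

lemma iterG_add (g : Int → Int) (w : Int) (a b : Nat) :
    iterG g w (a + b) = iterG g (iterG g w a) b := by
  induction a generalizing w with
  | zero => simp only [Nat.zero_add, iterG]
  | succ a ih =>
    have h : a + 1 + b = (a + b) + 1 := by omega
    rw [h]
    show iterG g (g w) (a + b) = iterG g (iterG g (g w) a) b
    exact ih (g w)

lemma iterG_cycle_mul (g : Int → Int) (v : Int) (c : Nat) (h : iterG g v c = v) :
    ∀ (k a : Nat), iterG g v (k * c + a) = iterG g v a := by
  intro k
  induction k with
  | zero => intro a; simp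
  | succ k ih =>
    intro a
    have h1 : (k + 1) * c + a = c + (k * c + a) := by ring
    rw [h1, iterG_add, h, ih]

lemma fA_eq (fuel : Nat) : ∀ (n K now : Int), now < K → fuel = (K - now).toNat →
    fA fuel n K now = iterG dstep n fuel := by
  induction fuel with
  | zero => intro n K now h hf; omega
  | succ fuel ih =>
    intro n K now h hf
    show (if now + 1 = K then dstep n else fA fuel (dstep n) K (now + 1)) = iterG dstep (dstep n) fuel
    by_cases hK : now + 1 = K
    · have : fuel = 0 := by omega
      simp [hK, this, iterG]
    · have h1 : now + 1 < K := by omega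
      rw [if_neg hK]
      exact ih (dstep n) K (now + 1) h1 (by omega)

-- the loop invariant: every seen entry (x, s) records the value x the loop held when the step
-- counter was s, so stepping x forward (now - s) times re-creates the current value v
lemma loopB_eq (K : Int) (fuel : Nat) :
    ∀ (seen : PySem.Dict Int Int) (v now : Int),
    now ≤ K → (K - now).toNat + 1 ≤ fuel →
    (∀ x s, seen.get? x = some s → s < now ∧ iterG dstep x (now - s).toNat = v) →
    loopB K seen v now fuel = iterG dstep v (K - now).toNat := by
  induction fuel with
  | zero => intro seen v now _ hf _; omega
  | succ fuel ih =>
    intro seen v now hle hf hseen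
    rw [loopB]
    by_cases hK : now = K
    · rw [if_pos hK]
      simp [hK, iterG]
    · rw [if_neg hK]
      have hlt : now < K := lt_of_le_of_ne hle hK
      have hbody : loopB K (seen.insert v now) (dstep v) (now + 1) fuel
          = iterG dstep v (K - now).toNat := by
        have h1 : (K - now).toNat = (K - (now + 1)).toNat + 1 := by omega
        have h2 : iterG dstep v ((K - (now + 1)).toNat + 1) = iterG dstep (dstep v) (K - (now + 1)).toNat := rfl
        rw [h1, h2]
        apply ih (seen.insert v now) (dstep v) (now + 1) (by omega) (by omega)
        intro x s hx
        rw [PySem.Dict.get?_insert] at hx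
        by_cases hxv : x = v
        · rw [if_pos hxv] at hx
          obtain rfl : now = s := by injection hx
          refine ⟨by omega, ?_⟩
          rw [show (now + 1 - now).toNat = 1 by omega, hxv]
          rfl
        · rw [if_neg hxv] at hx
          obtain ⟨hs, hiter⟩ := hseen x s hx
          refine ⟨by omega, ?_⟩
          rw [show (now + 1 - s).toNat = (now - s).toNat + 1 by omega, iterG_succ_right dstep, hiter]
      cases hg : PySem.Dict.get? seen v with
      | none => exact hbody
      | some prev =>
        simp only
        obtain ⟨hprev, hcyc⟩ := hseen v prev hg
        by_cases hskip : 0 < PySem.Int.floordiv (K - now) (now - prev)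
        · rw [if_pos hskip]
          set skip := PySem.Int.floordiv (K - now) (now - prev) with hskipdef
          have hc : (0:Int) < now - prev := by omega
          set J := skip * (now - prev) with hJ
          have hJpos : (0:Int) < J := mul_pos hskip hc
          -- skip * cycle ≤ K - now  (floor division bracket)
          have hjle : J ≤ K - now := by
            exact (PySem.Int.le_floordiv_iff_mul_le (a := K - now) (b := now - prev)
              (q := skip) hc).mp le_rfl
          have hJnat : J.toNat = skip.toNat * (now - prev).toNat := by
            have h1 : ((skip.toNat * (now - prev).toNat : Nat) : Int) = J := by
              push_cast
              rw [Int.toNat_of_nonneg hskip.le, Int.toNat_of_nonneg hc.le, hJ]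
            omega
          have hrec := ih seen v (now + J) (by omega) (by omega) ?_
          · rw [hrec]
            -- iterG dstep v is periodic with period (now - prev).toNat: peel J.toNat whole cycles
            have hsplit : (K - now).toNat = J.toNat + (K - (now + J)).toNat := by omega
            rw [hsplit, hJnat]
            exact (iterG_cycle_mul dstep v (now - prev).toNat hcyc skip.toNat _).symm
          · -- the seen invariant is preserved across the jump: v repeats every cycle steps
            intro x s hx
            obtain ⟨hs, hiter⟩ := hseen x s hx
            refine ⟨by omega, ?_⟩
            have hxsplit : (now + J - s).toNat = (now - s).toNat + J.toNat := by omega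
            -- iterG g x (t + k*c) = iterG g (iterG g x t) (k*c) = iterG g v (k*c + 0) = v
            rw [hxsplit, hJnat, iterG_add, hiter,
              show skip.toNat * (now - prev).toNat = skip.toNat * (now - prev).toNat + 0 by omega,
              iterG_cycle_mul dstep v (now - prev).toNat hcyc skip.toNat 0]
            rfl
        · rw [if_neg hskip]
          exact hbody

-- ===== VERDICT (by name: the statement is the Claim_ definition above) =====
theorem f_spec : Claim_equal_f := by
  intro number K now _ hpre
  obtain ⟨hn, hK⟩ := hpre
  unfold Spec_f f f_alt
  rw [fA_eq _ number K now hK rfl]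
  exact (loopB_eq K ((K - now).toNat + 1) PySem.Dict.empty number now (by omega) le_rfl
    (by intro x s hx; rw [PySem.Dict.get?_empty] at hx; exact absurd hx (by simp))).symm
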